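-- pv_equiv track=rewrite | github.com/ockham-sh/parsimony-connectors | packages/mcp/parsimony_mcp/cli/_merge.py | _dep_name
-- ===== SOURCE A (Python) =====
-- def _dep_name(spec: str) -> str:
--     """Canonicalise a PEP 508 dependency spec's distribution name.
--
--     ``parsimony-fred>=0.1,<1`` and ``parsimony-fred`` both return
--     ``parsimony-fred``. Used for dedup: two specs of the same package
--     should never end up in the merged dependency list.
--     """
--     name = spec
--     for sep in ("[", "(", ";", "="):
--         if sep in name:
--             name = name.split(sep, 1)[0]
--     for op in ("<", ">", "!", "~"):
--         if op in name:
--             name = name.split(op, 1)[0]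
--     return name.strip().lower().replace("_", "-")
-- ===== SOURCE B (Python) =====
-- DELIMS = "[(;=<>!~"
--
--
-- def _dep_name(spec: str) -> str:
--     name = ""
--     for c in spec:
--         if c in DELIMS:
--             break
--         name += c
--     return name.strip().lower().replace("_", "-")
-- ===== Notes on version B (the rewrite author's own statement) =====
-- stated objective: simpler
-- what changed: Replaces the two sequential rounds of membership-test-plus-split truncation (8 separate scans/splits) by a single left-to-right pass that stops at the first character belonging to the merged delimiter set, then applies the same strip/lower/replace chain.
import Mathlib
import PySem

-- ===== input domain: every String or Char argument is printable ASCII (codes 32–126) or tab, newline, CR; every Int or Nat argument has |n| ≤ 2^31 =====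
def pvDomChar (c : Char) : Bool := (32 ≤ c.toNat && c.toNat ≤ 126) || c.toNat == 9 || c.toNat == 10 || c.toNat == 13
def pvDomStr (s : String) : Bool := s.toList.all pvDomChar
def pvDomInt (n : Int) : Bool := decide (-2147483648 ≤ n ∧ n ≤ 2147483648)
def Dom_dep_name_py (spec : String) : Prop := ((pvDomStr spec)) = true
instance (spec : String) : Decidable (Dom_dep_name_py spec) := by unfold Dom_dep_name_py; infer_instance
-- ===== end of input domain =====

-- B replaces A's eight membership-test-plus-split truncations by one pass that stops at the
-- first delimiter; objective: simpler. Equivalence of return values proved for all inputs.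

-- ===== PORT A =====
-- 'if sep in name: name = name.split(sep, 1)[0]' for one sep
def pvCutA (name : String) (sep : String) : String :=
  if PySem.Str.isIn sep name then
    ((PySem.Str.splitMax? name sep 1).getD []).headD ""
  else name

def dep_name_py (spec : String) : String :=
  let name := ["[", "(", ";", "="].foldl pvCutA spec
  let name := ["<", ">", "!", "~"].foldl pvCutA name
  PySem.Str.replace (PySem.Str.lower (PySem.Str.strip name)) "_" "-"

-- ===== PORT B =====
def pvDelims : List Char := ['[', '(', ';', '=', '<', '>', '!', '~']

-- the 'for c in spec: if c in DELIMS: break; name += c' loop is List.takeWhile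
def dep_name_py_alt (spec : String) : String :=
  let name := spec.toList.takeWhile (fun c => !pvDelims.contains c)
  String.ofList (PySem.Chars.replace (PySem.Chars.lower (PySem.Chars.strip name)) ['_'] ['-'])

-- ===== PRECONDITION & SPEC =====
def Spec_dep_name_py (spec : String) (out : String) : Prop := out = dep_name_py_alt spec
instance (spec : String) (out : String) : Decidable (Spec_dep_name_py spec out) := by unfold Spec_dep_name_py; infer_instance

-- ===== CLAIM (what is proved, stated in full; the proofs are below) =====
def Claim_equal_dep_name_py : Prop := ∀ (spec : String), Dom_dep_name_py spec → Spec_dep_name_py spec (dep_name_py spec)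

-- ===== LEMMAS AND PROOFS =====

-- splitOnMax.go with maxsplit counter 0 just flushes
theorem pv_go0 (sep : List Char) : ∀ (fuel : Nat) (l cur : List Char) (acc : List (List Char)),
    PySem.Chars.splitOnMax.go sep fuel 0 l cur acc = ((cur.reverse ++ l) :: acc).reverse := by
  intro fuel l cur acc
  cases fuel with
  | zero => simp [PySem.Chars.splitOnMax.go]
  | succ n => cases l with
    | nil => simp [PySem.Chars.splitOnMax.go]
    | cons c rest => simp [PySem.Chars.splitOnMax.go]

-- head of a maxsplit-1 single-char split is the prefix before the first occurrence
theorem pv_go_head (c : Char) : ∀ (fuel : Nat) (l cur : List Char), l.length < fuel →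
    (PySem.Chars.splitOnMax.go [c] fuel 1 l cur []).headD [] =
      cur.reverse ++ l.takeWhile (fun x => x != c) := by
  intro fuel
  induction fuel with
  | zero => intro l cur h; omega
  | succ n ih =>
    intro l cur h
    cases l with
    | nil => simp [PySem.Chars.splitOnMax.go]
    | cons d rest =>
      by_cases hd : d = c
      · subst hd
        simp [PySem.Chars.splitOnMax.go, List.isPrefixOf, pv_go0]
      · have : ([c].isPrefixOf (d :: rest)) = false := by
          simp [List.isPrefixOf]; exact fun h => hd h.symm
        simp only [PySem.Chars.splitOnMax.go, this, if_neg (by omega : ¬ (1 : Nat) = 0),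
          Bool.false_eq_true, if_false]
        rw [ih rest (d :: cur) (by simpa using Nat.lt_of_succ_lt_succ h)]
        simp [hd]

theorem pv_go_ne_nil (sep : List Char) : ∀ (fuel : Nat) (m : Nat) (l cur : List Char) (acc : List (List Char)),
    PySem.Chars.splitOnMax.go sep fuel m l cur acc ≠ [] := by
  intro fuel
  induction fuel with
  | zero => intro m l cur acc; simp [PySem.Chars.splitOnMax.go]
  | succ n ih =>
    intro m l cur acc
    cases l with
    | nil => simp [PySem.Chars.splitOnMax.go]
    | cons d rest =>
      simp only [PySem.Chars.splitOnMax.go]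
      split
      · simp
      · split
        · exact ih _ _ _ _
        · exact ih _ _ _ _

theorem pv_takeWhile_of_not_mem (c : Char) (l : List Char) (h : c ∉ l) :
    l.takeWhile (fun x => x != c) = l := by
  induction l with
  | nil => rfl
  | cons d rest ih =>
    simp only [List.mem_cons, not_or] at h
    rw [List.takeWhile_cons, if_pos (by simp [bne]; exact fun he => h.1 he.symm), ih h.2]

-- one A-side cut, on the character-list level
theorem pv_cutA_toList (name sep : String) (c : Char) (hs : sep.toList = [c]) :
    (pvCutA name sep).toList = name.toList.takeWhile (fun x => x != c) := by
  unfold pvCutA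
  by_cases hin : PySem.Str.isIn sep name
  · rw [if_pos hin]
    have hsplit : PySem.Str.splitMax? name sep 1 =
        some ((PySem.Chars.splitOnMax name.toList [c] 1).map String.ofList) := by
      simp [PySem.Str.splitMax?, PySem.Chars.splitMax?, hs]
    rw [hsplit]
    have hne := pv_go_ne_nil [c] (name.toList.length + 1) 1 name.toList [] []
    have hhead := pv_go_head c (name.toList.length + 1) name.toList [] (by omega)
    unfold PySem.Chars.splitOnMax at *
    simp only [show ¬((1 : Int) < 0) by omega, Int.toNat_one] at *
    obtain ⟨x, xs, hx⟩ := List.exists_cons_of_ne_nil hne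
    rw [hx] at hhead ⊢
    simp only [List.headD_cons, List.reverse_nil, List.nil_append] at hhead
    simp [Option.getD_some, hhead]
  · rw [if_neg hin]
    have : ¬ ([c] <:+: name.toList) := by
      rw [← hs, ← PySem.Str.isIn_iff_infix]; simpa using hin
    have hcm : c ∉ name.toList := by
      intro hm
      apply this
      obtain ⟨s, t, hst⟩ := List.mem_iff_append.mp hm
      exact ⟨s, t, by simp [hst]⟩
    rw [pv_takeWhile_of_not_mem c name.toList hcm]

theorem pv_takeWhile_comb (p q : Char → Bool) (l : List Char) :
    (l.takeWhile p).takeWhile q = l.takeWhile (fun x => p x && q x) := by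
  induction l with
  | nil => rfl
  | cons d rest ih =>
    by_cases hp : p d
    · by_cases hq : q d
      · simp [hp, hq, ih]
      · simp [hp, hq]
    · simp [hp]

theorem pv_pred_eq (x : Char) :
    ((((((((x != '[') && (x != '(')) && (x != ';')) && (x != '=')) && (x != '<')) && (x != '>')) && (x != '!')) && (x != '~'))
      = !pvDelims.contains x := by
  simp only [show pvDelims = ['[', '(', ';', '=', '<', '>', '!', '~'] from rfl,
    List.contains_cons, List.contains_nil, Bool.or_false, Bool.not_or, bne]
  cases h1 : x == '[' <;> cases h2 : x == '(' <;> cases h3 : x == ';' <;> cases h4 : x == '=' <;>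
    cases h5 : x == '<' <;> cases h6 : x == '>' <;> cases h7 : x == '!' <;> cases h8 : x == '~' <;> simp_all

theorem pv_cuts_toList (spec : String) :
    (["<", ">", "!", "~"].foldl pvCutA (["[", "(", ";", "="].foldl pvCutA spec)).toList
      = spec.toList.takeWhile (fun c => !pvDelims.contains c) := by
  simp only [List.foldl]
  rw [pv_cutA_toList _ _ '~' rfl, pv_cutA_toList _ _ '!' rfl, pv_cutA_toList _ _ '>' rfl,
    pv_cutA_toList _ _ '<' rfl, pv_cutA_toList _ _ '=' rfl, pv_cutA_toList _ _ ';' rfl,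
    pv_cutA_toList _ _ '(' rfl, pv_cutA_toList _ _ '[' rfl]
  simp only [pv_takeWhile_comb]
  exact congrFun (congrArg _ (funext pv_pred_eq)) _

-- ===== VERDICT (by name: the statement is the Claim_ definition above) =====
theorem dep_name_py_spec : Claim_equal_dep_name_py := by
  intro spec _
  unfold Spec_dep_name_py dep_name_py dep_name_py_alt
  rw [← String.toList_inj]
  simp only [PySem.Str.toList_replace, PySem.Str.toList_lower, PySem.Str.toList_strip]
  rw [pv_cuts_toList]
  simp [String.toList_ofList]
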